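-- pv_equiv track=rewrite | github.com/gshklovs/BerkeleyAIHacks | nextjs-flask/api/models/extract_nodes.py | parse_entities_and_relationships
-- ===== SOURCE A (Python) =====
-- def parse_entities_and_relationships(structured_response):
--     """
--     Parses the structured response to extract entity-relationship triplets.
--
--     Args:
--     - structured_response (str): The structured response containing entity-relationship data.
--
--     Returns:
--     - list: A list of dictionaries representing the triplets.
--     """
--     lines = structured_response.split("\n")
--     triplets = []
--     current_triplet = {}
--
--     for line in lines:
--         if line.startswith("1. Source Entity:"):
--             if current_triplet:
--                 triplets.append(current_triplet)
--                 current_triplet = {}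
--             current_triplet["source"] = normalize_entity_name(
--                 line.replace("1. Source Entity:", "").strip()
--             )
--         elif line.startswith("2. Relationship:"):
--             current_triplet["relationship"] = line.replace(
--                 "2. Relationship:", ""
--             ).strip()
--         elif line.startswith("3. Destination Entity:"):
--             current_triplet["destination"] = normalize_entity_name(
--                 line.replace("3. Destination Entity:", "").strip()
--             )
--
--     if current_triplet:
--         triplets.append(current_triplet)
--
--     return triplets
--
-- def normalize_entity_name(entity):
--     """
--     Normalizes the entity name for consistency.
--
--     Args:
--     - entity (str): The entity name to normalize.
--
--     Returns:
--     - str: The normalized entity name.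
--     """
--     entity = entity.lower().strip()
--     entity = entity.replace("inc.", "inc").replace("corp.", "corp")
--     return entity
-- ===== SOURCE B (Python) =====
-- def normalize_entity_name(entity):
--     entity = entity.lower().strip()
--     entity = entity.replace("inc.", "inc").replace("corp.", "corp")
--     return entity
--
--
-- def parse_entities_and_relationships(structured_response):
--     """Two-pass version: split the lines into groups at each '1. Source Entity:'
--     boundary, then build one dict per group and keep the non-empty ones."""
--     lines = structured_response.split("\n")
--     # pass 1: group the lines; every boundary line starts a new group
--     groups = []
--     current = []
--     for line in lines:
--         if line.startswith("1. Source Entity:"):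
--             groups.append(current)
--             current = [line]
--         else:
--             current.append(line)
--     groups.append(current)
--     # pass 2: one dict per group (later matching lines overwrite earlier ones)
--     triplets = []
--     for group in groups:
--         triplet = {}
--         for line in group:
--             if line.startswith("1. Source Entity:"):
--                 triplet["source"] = normalize_entity_name(
--                     line.replace("1. Source Entity:", "").strip()
--                 )
--             elif line.startswith("2. Relationship:"):
--                 triplet["relationship"] = line.replace("2. Relationship:", "").strip()
--             elif line.startswith("3. Destination Entity:"):
--                 triplet["destination"] = normalize_entity_name(
--                     line.replace("3. Destination Entity:", "").strip()
--                 )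
--         if triplet:
--             triplets.append(triplet)
--     return triplets
-- ===== Notes on version B (the rewrite author's own statement) =====
-- stated objective: alternative
-- what changed: Replaces A's single-pass mutable current_triplet state machine with a two-pass decomposition: first cut the line list into groups at each '1. Source Entity:' boundary, then build one dict per group and keep the non-empty ones.
import Mathlib
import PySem

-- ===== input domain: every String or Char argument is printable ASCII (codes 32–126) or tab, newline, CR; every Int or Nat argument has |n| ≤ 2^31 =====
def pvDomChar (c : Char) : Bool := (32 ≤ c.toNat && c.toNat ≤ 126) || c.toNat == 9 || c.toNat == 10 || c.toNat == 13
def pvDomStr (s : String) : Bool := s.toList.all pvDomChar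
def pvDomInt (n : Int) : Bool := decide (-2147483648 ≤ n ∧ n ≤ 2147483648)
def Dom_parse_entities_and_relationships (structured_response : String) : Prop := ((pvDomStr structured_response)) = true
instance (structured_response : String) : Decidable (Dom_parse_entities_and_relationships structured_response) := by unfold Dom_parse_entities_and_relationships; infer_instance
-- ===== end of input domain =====

-- B replaces A's one-pass mutable current_triplet state machine by a two-pass
-- group-at-boundaries-then-build-dict-per-group decomposition (objective: alternative; same cost).

-- shared helpers: s.split("\n") (exact: Chars.splitOn is s.split(sep) for sep != "") and
-- normalize_entity_name (identical in both sources)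
def pvSplitLines (s : String) : List String :=
  (PySem.Chars.splitOn s.toList ['\n']).map String.ofList

def pvNorm (entity : String) : String :=
  PySem.Str.replace (PySem.Str.replace (PySem.Str.strip (PySem.Str.lower entity)) "inc." "inc") "corp." "corp"

-- ===== PORT A =====
-- one fold step of A's loop over lines: state = (triplets, current_triplet)
def pvStepA (st : List (PySem.Dict String String) × PySem.Dict String String) (line : String) :
    List (PySem.Dict String String) × PySem.Dict String String :=
  if PySem.Str.startswith line "1. Source Entity:" then
    let st' := if st.2.items.isEmpty then st else (st.1 ++ [st.2], PySem.Dict.empty)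
    (st'.1, st'.2.insert "source" (pvNorm (PySem.Str.strip (PySem.Str.replace line "1. Source Entity:" ""))))
  else if PySem.Str.startswith line "2. Relationship:" then
    (st.1, st.2.insert "relationship" (PySem.Str.strip (PySem.Str.replace line "2. Relationship:" "")))
  else if PySem.Str.startswith line "3. Destination Entity:" then
    (st.1, st.2.insert "destination" (pvNorm (PySem.Str.strip (PySem.Str.replace line "3. Destination Entity:" ""))))
  else st

def parse_entities_and_relationships (structured_response : String) : List (List (String × String)) :=
  let lines := pvSplitLines structured_response
  let st := lines.foldl pvStepA ([], PySem.Dict.empty)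
  let triplets := if st.2.items.isEmpty then st.1 else st.1 ++ [st.2]
  triplets.map (·.items)

-- ===== PORT B =====
-- pass-1 step: cut the line list into groups at each boundary line
def pvStepG (st : List (List String) × List String) (line : String) :
    List (List String) × List String :=
  if PySem.Str.startswith line "1. Source Entity:" then (st.1 ++ [st.2], [line])
  else (st.1, st.2 ++ [line])

-- pass-2 inner step: fold one line of a group into its dict
def pvBuildLine (d : PySem.Dict String String) (line : String) : PySem.Dict String String :=
  if PySem.Str.startswith line "1. Source Entity:" then
    d.insert "source" (pvNorm (PySem.Str.strip (PySem.Str.replace line "1. Source Entity:" "")))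
  else if PySem.Str.startswith line "2. Relationship:" then
    d.insert "relationship" (PySem.Str.strip (PySem.Str.replace line "2. Relationship:" ""))
  else if PySem.Str.startswith line "3. Destination Entity:" then
    d.insert "destination" (pvNorm (PySem.Str.strip (PySem.Str.replace line "3. Destination Entity:" "")))
  else d

def pvBuild (group : List String) : PySem.Dict String String :=
  group.foldl pvBuildLine PySem.Dict.empty

def parse_entities_and_relationships_alt (structured_response : String) : List (List (String × String)) :=
  let lines := pvSplitLines structured_response
  let st := lines.foldl pvStepG ([], [])
  let groups := st.1 ++ [st.2]
  groups.foldl (fun acc g =>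
    let d := pvBuild g
    if d.items.isEmpty then acc else acc ++ [d.items]) []

-- ===== PRECONDITION & SPEC =====
def Spec_parse_entities_and_relationships (structured_response : String) (out : List (List (String × String))) : Prop := out = parse_entities_and_relationships_alt structured_response
instance (structured_response : String) (out : List (List (String × String))) : Decidable (Spec_parse_entities_and_relationships structured_response out) := by unfold Spec_parse_entities_and_relationships; infer_instance

-- ===== CLAIM (what is proved, stated in full; the proofs are below) =====
def Claim_equal_parse_entities_and_relationships : Prop := ∀ (structured_response : String), Dom_parse_entities_and_relationships structured_response → Spec_parse_entities_and_relationships structured_response (parse_entities_and_relationships structured_response)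

-- ===== LEMMAS AND PROOFS =====

-- the common "rest of the output" function both loops compute, given the open dict c
def pvF (c : PySem.Dict String String) : List String → List (PySem.Dict String String)
  | [] => if c.items.isEmpty then [] else [c]
  | l :: ls =>
    if PySem.Str.startswith l "1. Source Entity:" then
      (if c.items.isEmpty then [] else [c]) ++ pvF (pvBuildLine PySem.Dict.empty l) ls
    else pvF (pvBuildLine c l) ls

-- B's pass-2 emitter over a list of groups
def pvEmit (gs : List (List String)) (acc : List (List (String × String))) : List (List (String × String)) :=
  gs.foldl (fun acc g =>
    let d := pvBuild g
    if d.items.isEmpty then acc else acc ++ [d.items]) acc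

lemma dict_eq_empty_of_items_nil (d : PySem.Dict String String) (h : d.items.isEmpty = true) :
    d = PySem.Dict.empty := by
  apply PySem.Dict.ext
  simpa [List.isEmpty_iff] using h

-- A's loop followed by the final flush computes pvF
lemma a_fold (ls : List String) (T : List (PySem.Dict String String)) (c : PySem.Dict String String) :
    (let st := ls.foldl pvStepA (T, c)
     (if st.2.items.isEmpty then st.1 else st.1 ++ [st.2]).map (·.items))
    = (T ++ pvF c ls).map (·.items) := by
  induction ls generalizing T c with
  | nil => simp only [List.foldl_nil, pvF]; split_ifs <;> simp
  | cons l ls ih =>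
    simp only [List.foldl_cons, pvF]
    by_cases hb : PySem.Str.startswith l "1. Source Entity:"
    · by_cases he : c.items.isEmpty
      · rw [dict_eq_empty_of_items_nil c he]
        simp only [pvStepA, pvBuildLine, hb, if_true, PySem.Dict.empty,
          List.isEmpty_nil, if_true] at *
        rw [ih]; simp
      · simp only [pvStepA, pvBuildLine, hb, if_true, he]
        rw [ih]; simp
    · have hst : pvStepA (T, c) l = (T, pvBuildLine c l) := by
        simp only [pvStepA, pvBuildLine, hb, Bool.false_eq_true, if_false]
        split_ifs <;> rfl
      rw [hst, ih, if_neg hb]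

-- B's grouping loop followed by the emitter computes pvF of the open group's dict
lemma b_fold (ls : List String) (G : List (List String)) (cur : List String)
    (acc : List (List (String × String))) :
    (let st := ls.foldl pvStepG (G, cur)
     pvEmit (st.1 ++ [st.2]) acc)
    = pvEmit G acc ++ (pvF (pvBuild cur) ls).map (·.items) := by
  induction ls generalizing G cur acc with
  | nil =>
    simp only [List.foldl_nil, pvF, pvEmit, List.foldl_append, List.foldl_cons, List.foldl_nil]
    split_ifs <;> simp
  | cons l ls ih =>
    simp only [List.foldl_cons, pvF]
    by_cases hb : PySem.Str.startswith l "1. Source Entity:"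
    · simp only [pvStepG, hb, if_true]
      rw [ih]
      have h1 : pvBuild [l] = pvBuildLine PySem.Dict.empty l := rfl
      have h2 : pvEmit (G ++ [cur]) acc
          = pvEmit G acc ++ (if (pvBuild cur).items.isEmpty then [] else [(pvBuild cur).items]) := by
        simp only [pvEmit, List.foldl_append, List.foldl_cons, List.foldl_nil]
        split_ifs <;> simp
      rw [h1, h2]
      split_ifs <;> simp
    · simp only [pvStepG, hb, Bool.false_eq_true, if_false]
      rw [ih]
      have : pvBuild (cur ++ [l]) = pvBuildLine (pvBuild cur) l := by
        simp [pvBuild, List.foldl_append]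
      rw [this]

-- ===== VERDICT (by name: the statement is the Claim_ definition above) =====
theorem parse_entities_and_relationships_spec : Claim_equal_parse_entities_and_relationships := by
  intro s _
  show parse_entities_and_relationships s = parse_entities_and_relationships_alt s
  unfold parse_entities_and_relationships parse_entities_and_relationships_alt
  have hA := a_fold (pvSplitLines s) [] PySem.Dict.empty
  have hB := b_fold (pvSplitLines s) [] [] []
  simp only at hA hB
  rw [hA]
  have h0 : pvBuild [] = PySem.Dict.empty := rfl
  rw [h0] at hB
  simp only [pvEmit, List.foldl_nil, List.nil_append] at hB ⊢
  exact hB.symm
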